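-- pv_equiv track=rewrite | github.com/yrankineNEU/CodePathTIP102 | Unit3_QueueStackPointers/session1_simple1.py | engagement_boost
-- ===== SOURCE A (Python) =====
-- def engagement_boost(engagements):
--     squared_engagements = []
--
--     # initialize two pointers
--     left = 0
--     right = len(engagements) -1
--
--     while left <= right:
--         if left == right:
--             left_squared = engagements[left] * engagements[left]
--             squared_engagements.append(left_squared)
--         else:
--             left_squared = engagements[left] * engagements[left]
--             right_squared = engagements[right] * engagements[right]
--             squared_engagements.append(left_squared)
--             squared_engagements.append(right_squared)
--
--         left += 1
--         right -= 1
--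
--     squared_engagements.sort(reverse=True)
--
--     return squared_engagements
-- ===== SOURCE B (Python) =====
-- def engagement_boost(engagements):
--     # sort the inputs by absolute value (ascending), square, then reverse
--     return [x * x for x in sorted(engagements, key=abs)][::-1]
-- ===== Notes on version B (the rewrite author's own statement) =====
-- stated objective: simpler
-- what changed: Replaces the two-pointer outside-in squaring loop followed by an in-place descending sort of the squares with a one-liner that sorts the inputs by absolute value, squares them in order, and reverses; no index arithmetic and no sort of the derived list.
import Mathlib
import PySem

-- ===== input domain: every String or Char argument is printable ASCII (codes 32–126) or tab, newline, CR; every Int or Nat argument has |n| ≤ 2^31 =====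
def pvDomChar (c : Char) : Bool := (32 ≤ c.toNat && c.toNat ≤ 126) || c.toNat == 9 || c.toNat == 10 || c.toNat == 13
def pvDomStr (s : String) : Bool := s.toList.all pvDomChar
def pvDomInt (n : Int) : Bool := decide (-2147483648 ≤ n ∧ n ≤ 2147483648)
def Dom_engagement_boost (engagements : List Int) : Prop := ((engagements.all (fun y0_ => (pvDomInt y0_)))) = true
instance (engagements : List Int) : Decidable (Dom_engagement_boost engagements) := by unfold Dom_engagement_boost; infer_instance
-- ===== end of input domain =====

-- B sorts the inputs by absolute value, squares in order and reverses, instead of A's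
-- two-pointer squaring loop followed by a descending sort of the squares (objective: simpler).

-- ===== PORT A =====
-- the 'while left <= right' loop, accumulating squared_engagements
def engagementLoop (engagements : List Int) (left right : Int) (acc : List Int) : List Int :=
  if left ≤ right then
    if left = right then
      let left_squared := PySem.List.pyGetD engagements left 0 * PySem.List.pyGetD engagements left 0
      engagementLoop engagements (left + 1) (right - 1) (acc ++ [left_squared])
    else
      let left_squared := PySem.List.pyGetD engagements left 0 * PySem.List.pyGetD engagements left 0
      let right_squared := PySem.List.pyGetD engagements right 0 * PySem.List.pyGetD engagements right 0
      engagementLoop engagements (left + 1) (right - 1) (acc ++ [left_squared, right_squared])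
  else acc
termination_by (right - left + 1).toNat
decreasing_by all_goals omega

def engagement_boost (engagements : List Int) : List Int :=
  PySem.List.sorted (engagementLoop engagements 0 ((engagements.length : Int) - 1) [])
    (fun x => x) true

-- ===== PORT B =====
def engagement_boost_alt (engagements : List Int) : List Int :=
  ((PySem.List.sorted engagements (fun x => |x|) false).map (fun x => x * x)).reverse

-- ===== PRECONDITION & SPEC =====
def Spec_engagement_boost (engagements : List Int) (out : List Int) : Prop := out = engagement_boost_alt engagements
instance (engagements : List Int) (out : List Int) : Decidable (Spec_engagement_boost engagements out) := by unfold Spec_engagement_boost; infer_instance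

-- ===== CLAIM (what is proved, stated in full; the proofs are below) =====
def Claim_equal_engagement_boost : Prop := ∀ (engagements : List Int), Dom_engagement_boost engagements → Spec_engagement_boost engagements (engagement_boost engagements)

-- ===== LEMMAS AND PROOFS =====

-- the loop output is acc plus (a permutation of) the squares of the slice xs[l..r]
theorem engagementLoop_perm (xs : List Int) :
    ∀ (n : Nat) (l r : Int) (acc : List Int), (r - l + 1).toNat ≤ n → 0 ≤ l → r < (xs.length : Int) →
    (engagementLoop xs l r acc).Perm
      (acc ++ ((xs.take (r + 1).toNat).drop l.toNat).map (fun x => x * x)) := by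
  intro n
  induction n with
  | zero =>
    intro l r acc hn hl hr
    have hlr : r < l := by omega
    rw [engagementLoop]
    have : ((xs.take (r + 1).toNat).drop l.toNat) = [] := by
      apply List.drop_eq_nil_of_le
      have := List.length_take_le (r + 1).toNat xs
      omega
    simp [this, if_neg (by omega : ¬ l ≤ r)]
  | succ n ih =>
    intro l r acc hn hl hr
    by_cases hle : l ≤ r
    case neg =>
      rw [engagementLoop]
      have : ((xs.take (r + 1).toNat).drop l.toNat) = [] := by
        apply List.drop_eq_nil_of_le
        have := List.length_take_le (r + 1).toNat xs
        omega
      simp [this, if_neg hle]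
    have hrlen : r.toNat < xs.length := by omega
    have hllen : l.toNat < xs.length := by omega
    -- the slice xs[l..r] splits as xs[l] :: middle ++ [xs[r]] (or just [xs[l]] when l = r)
    have htake : xs.take (r + 1).toNat = xs.take r.toNat ++ [xs[r.toNat]] := by
      have : (r + 1).toNat = r.toNat + 1 := by omega
      rw [this, List.take_add_one, List.getElem?_eq_getElem hrlen]
      rfl
    rw [engagementLoop, if_pos hle]
    by_cases heq : l = r
    · rw [if_pos heq]
      subst heq
      have ih' := ih (l + 1) (l - 1) (acc ++ [PySem.List.pyGetD xs l 0 * PySem.List.pyGetD xs l 0]) (by omega) (by omega) (by omega)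
      refine ih'.trans ?_
      have hmid : ((xs.take (l - 1 + 1).toNat).drop (l + 1).toNat) = [] := by
        apply List.drop_eq_nil_of_le
        have := List.length_take_le (l - 1 + 1).toNat xs
        omega
      have hseg : ((xs.take (l + 1).toNat).drop l.toNat) = [xs[l.toNat]] := by
        rw [htake, List.drop_append_of_le_length (by rw [List.length_take]; omega)]
        have h1 : (xs.take l.toNat).drop l.toNat = [] := by
          apply List.drop_eq_nil_of_le
          have := List.length_take_le l.toNat xs
          omega
        rw [h1, List.nil_append]
      rw [hmid, hseg, PySem.List.pyGetD_eq_getElem xs 0 hl (by omega)]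
      simp
    · rw [if_neg heq]
      have hA : (r - 1 - (l + 1) + 1).toNat ≤ n := by omega
      have hB : (0:Int) ≤ l + 1 := by omega
      have hC : r - 1 < (xs.length : Int) := by omega
      have ih' := ih (l + 1) (r - 1)
        (acc ++ [PySem.List.pyGetD xs l 0 * PySem.List.pyGetD xs l 0,
                 PySem.List.pyGetD xs r 0 * PySem.List.pyGetD xs r 0]) hA hB hC
      refine ih'.trans ?_
      have hlr' : l < r := lt_of_le_of_ne hle heq
      -- segment for the recursive call: xs[l+1..r-1]
      have hseg : ((xs.take (r + 1).toNat).drop l.toNat)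
          = xs[l.toNat] :: (((xs.take (r - 1 + 1).toNat).drop (l + 1).toNat) ++ [xs[r.toNat]]) := by
        have h1 : (r - 1 + 1).toNat = r.toNat := by omega
        rw [htake, List.drop_append_of_le_length (by rw [List.length_take]; omega), h1]
        have h2 : (xs.take r.toNat).drop l.toNat = xs[l.toNat] :: (xs.take r.toNat).drop (l.toNat + 1) := by
          rw [List.drop_eq_getElem_cons (by simp; omega)]
          congr 1
          rw [List.getElem_take]
        rw [h2]
        have h3 : (l + 1).toNat = l.toNat + 1 := by omega
        rw [h3]
        simp
      rw [hseg,
        PySem.List.pyGetD_eq_getElem xs 0 hl (by omega),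
        PySem.List.pyGetD_eq_getElem xs 0 (by omega : (0:Int) ≤ r) (by omega)]
      simp only [List.map_cons, List.map_append, List.map_nil]
      rw [List.append_assoc]
      refine List.Perm.append_left acc ?_
      refine List.Perm.cons _ ?_
      exact (List.perm_append_singleton _ _).symm

-- A's loop output is a permutation of the squares of xs
theorem loop_perm_map (xs : List Int) :
    (engagementLoop xs 0 ((xs.length : Int) - 1) []).Perm (xs.map (fun x => x * x)) := by
  have h := engagementLoop_perm xs (xs.length + 1) 0 ((xs.length : Int) - 1) []
    (by omega) le_rfl (by omega)
  simpa [show ((xs.length : Int) - 1 + 1).toNat = xs.length by omega] using h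

-- squaring is monotone in the absolute value
theorem sq_le_sq_of_abs_le {a b : Int} (h : |a| ≤ |b|) : a * a ≤ b * b := by
  have := mul_self_le_mul_self (abs_nonneg a) h
  simpa [abs_mul_abs_self] using this

theorem engagement_boost_spec' (engagements : List Int) :
    engagement_boost engagements = engagement_boost_alt engagements := by
  unfold engagement_boost engagement_boost_alt
  set sq : Int → Int := fun x => x * x with hsq
  -- both sides are permutations of (engagements.map sq)
  have hpermL : (PySem.List.sorted (engagementLoop engagements 0 ((engagements.length : Int) - 1) []) (fun x => x) true).Perm (engagements.map sq) :=
    (PySem.List.sorted_perm _ _ _).trans (loop_perm_map engagements)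
  have hpermR : (((PySem.List.sorted engagements (fun x => |x|) false).map sq).reverse).Perm (engagements.map sq) :=
    (List.reverse_perm _).trans ((PySem.List.sorted_perm _ _ _).map sq)
  -- both sides are sorted descending
  have hsortL : (PySem.List.sorted (engagementLoop engagements 0 ((engagements.length : Int) - 1) []) (fun x => x) true).Pairwise (fun a b => b ≤ a) :=
    PySem.List.sorted_pairwise_rev _ _
  have hsortR : (((PySem.List.sorted engagements (fun x => |x|) false).map sq).reverse).Pairwise (fun a b => b ≤ a) := by
    rw [List.pairwise_reverse]
    refine List.Pairwise.map sq (fun a b h => ?_) (PySem.List.sorted_pairwise engagements (fun x => |x|))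
    exact sq_le_sq_of_abs_le h
  exact List.Perm.eq_of_pairwise (fun a b _ _ h1 h2 => le_antisymm h2 h1) hsortL hsortR (hpermL.trans hpermR.symm)

-- ===== VERDICT (by name: the statement is the Claim_ definition above) =====
theorem engagement_boost_spec : Claim_equal_engagement_boost := by
  intro engagements _
  exact engagement_boost_spec' engagements
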